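-- pv_equiv track=rewrite | github.com/ritikasrv12/TCS_CodeVita_Season_12 | Orchard.py | count_valid_combinations
-- ===== SOURCE A (Python) =====
-- def count_valid_combinations(trees):
--     n = len(trees)
--     count = 0
--
--     # Count the occurrences of each tree type in the current selection
--     count_M_before = 0  # Count of 'M' before the current index
--     count_L_before = 0  # Count of 'L' before the current index
--
--     # First pass from left to right
--     for i in range(n):
--         if trees[i] == 'M':
--             # If we choose 'M', count how many 'L's we can choose after
--             count += count_L_before * (count_L_before - 1) // 2
--             count_M_before += 1
--         elif trees[i] == 'L':
--             # If we choose 'L', count how many 'M's we can choose after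
--             count += count_M_before * (count_M_before - 1) // 2
--             count_L_before += 1
--
--     # Reset counters for the second pass
--     count_M_after = 0  # Count of 'M' after the current index
--     count_L_after = 0  # Count of 'L' after the current index
--
--     # Second pass from right to left
--     for i in range(n - 1, -1, -1):
--         if trees[i] == 'M':
--             count += count_L_after * (count_L_after - 1) // 2
--             count_M_after += 1
--         elif trees[i] == 'L':
--             count += count_M_after * (count_M_after - 1) // 2
--             count_L_after += 1
--
--     return count
-- ===== SOURCE B (Python) =====
-- def count_valid_combinations(trees):
--     totalM = trees.count('M')
--     totalL = trees.count('L')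
--     count = 0
--     mb = 0
--     lb = 0
--     for t in trees:
--         if t == 'M':
--             la = totalL - lb
--             count += lb * (lb - 1) // 2 + la * (la - 1) // 2
--             mb += 1
--         elif t == 'L':
--             ma = totalM - mb
--             count += mb * (mb - 1) // 2 + ma * (ma - 1) // 2
--             lb += 1
--     return count
-- ===== Notes on version B (the rewrite author's own statement) =====
-- stated objective: alternative
-- what changed: Replaced A's two directional passes (forward with before-counts, then a second reverse pass with after-counts) by a single forward pass that precomputes totalM/totalL and derives each after-count as total minus before-count.
import Mathlib
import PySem

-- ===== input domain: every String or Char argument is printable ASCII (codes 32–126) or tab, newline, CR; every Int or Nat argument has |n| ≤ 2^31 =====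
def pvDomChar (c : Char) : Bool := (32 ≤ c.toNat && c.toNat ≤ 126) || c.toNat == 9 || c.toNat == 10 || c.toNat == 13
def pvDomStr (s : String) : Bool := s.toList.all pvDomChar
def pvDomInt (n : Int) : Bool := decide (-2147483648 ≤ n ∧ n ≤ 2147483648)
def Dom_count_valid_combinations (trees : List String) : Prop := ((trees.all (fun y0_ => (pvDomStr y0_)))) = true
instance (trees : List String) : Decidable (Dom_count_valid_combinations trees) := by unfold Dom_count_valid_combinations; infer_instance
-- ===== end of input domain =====

-- B merges A's two directional passes into one forward pass that derives the
-- "after" counts from the precomputed totals by complement (alternative decomposition).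

-- ===== PORT A =====
-- first pass (left to right), state = (count, count_M_before, count_L_before)
def pvStepFwd (s : Int × Int × Int) (t : String) : Int × Int × Int :=
  if t == "M" then (s.1 + PySem.Int.floordiv (s.2.2 * (s.2.2 - 1)) 2, s.2.1 + 1, s.2.2)
  else if t == "L" then (s.1 + PySem.Int.floordiv (s.2.1 * (s.2.1 - 1)) 2, s.2.1, s.2.2 + 1)
  else s

-- second pass (right to left), state = (count, count_M_after, count_L_after)
def pvStepBwd (s : Int × Int × Int) (t : String) : Int × Int × Int :=
  if t == "M" then (s.1 + PySem.Int.floordiv (s.2.2 * (s.2.2 - 1)) 2, s.2.1 + 1, s.2.2)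
  else if t == "L" then (s.1 + PySem.Int.floordiv (s.2.1 * (s.2.1 - 1)) 2, s.2.1, s.2.2 + 1)
  else s

def count_valid_combinations (trees : List String) : Int :=
  let s1 := trees.foldl pvStepFwd (0, 0, 0)
  let s2 := trees.reverse.foldl pvStepBwd (s1.1, 0, 0)
  s2.1

-- ===== PORT B =====
-- single forward pass, state = (count, mb, lb); after-counts come from the totals
def pvStepAlt (tM tL : Int) (s : Int × Int × Int) (t : String) : Int × Int × Int :=
  if t == "M" then
    let la := tL - s.2.2
    (s.1 + PySem.Int.floordiv (s.2.2 * (s.2.2 - 1)) 2 + PySem.Int.floordiv (la * (la - 1)) 2,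
     s.2.1 + 1, s.2.2)
  else if t == "L" then
    let ma := tM - s.2.1
    (s.1 + PySem.Int.floordiv (s.2.1 * (s.2.1 - 1)) 2 + PySem.Int.floordiv (ma * (ma - 1)) 2,
     s.2.1, s.2.2 + 1)
  else s

def count_valid_combinations_alt (trees : List String) : Int :=
  let totalM : Int := PySem.List.count trees "M"
  let totalL : Int := PySem.List.count trees "L"
  (trees.foldl (pvStepAlt totalM totalL) (0, 0, 0)).1

-- ===== PRECONDITION & SPEC =====
def Spec_count_valid_combinations (trees : List String) (out : Int) : Prop := out = count_valid_combinations_alt trees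
instance (trees : List String) (out : Int) : Decidable (Spec_count_valid_combinations trees out) := by unfold Spec_count_valid_combinations; infer_instance

-- ===== CLAIM (what is proved, stated in full; the proofs are below) =====
def Claim_equal_count_valid_combinations : Prop := ∀ (trees : List String), Dom_count_valid_combinations trees → Spec_count_valid_combinations trees (count_valid_combinations trees)

-- ===== LEMMAS AND PROOFS =====

def cntM : List String → Int
  | [] => 0
  | x :: xs => (if x == "M" then 1 else 0) + cntM xs

def cntL : List String → Int
  | [] => 0
  | x :: xs => (if x == "L" then 1 else 0) + cntL xs

-- extra contribution collected by the backward pass, started with counters (m, l)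
def pvT (xs : List String) (m l : Int) : Int :=
  match xs with
  | [] => 0
  | x :: rest =>
    pvT rest m l +
      (if x == "M" then PySem.Int.floordiv ((l + cntL rest) * (l + cntL rest - 1)) 2
       else if x == "L" then PySem.Int.floordiv ((m + cntM rest) * (m + cntM rest - 1)) 2
       else 0)

theorem bwd_fold (xs : List String) (c m l : Int) :
    xs.reverse.foldl pvStepBwd (c, m, l) = (c + pvT xs m l, m + cntM xs, l + cntL xs) := by
  induction xs generalizing c m l with
  | nil => simp [pvT, cntM, cntL]
  | cons x rest ih =>
    simp only [List.reverse_cons, List.foldl_append, List.foldl_cons, List.foldl_nil, ih]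
    by_cases hM : x == "M"
    · have hL : (x == "L") = false := by
        simp only [beq_iff_eq] at hM ⊢; simp [hM]
      simp [pvStepBwd, pvT, cntM, cntL, hM, hL, Prod.ext_iff]
      all_goals and_intros
      all_goals ring
    · by_cases hL : x == "L"
      · simp [pvStepBwd, pvT, cntM, cntL, hM, hL, Prod.ext_iff]
        all_goals and_intros
        all_goals ring
      · simp [pvStepBwd, pvT, cntM, cntL, hM, hL, Prod.ext_iff]
        all_goals and_intros
        all_goals ring

-- the count component of the forward fold is additive in its initial value
theorem fwd_shift (xs : List String) (c d m l : Int) :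
    (xs.foldl pvStepFwd (c + d, m, l)).1 = (xs.foldl pvStepFwd (c, m, l)).1 + d := by
  induction xs generalizing c m l with
  | nil => simp
  | cons x rest ih =>
    simp only [List.foldl_cons, pvStepFwd]
    split_ifs
    · rw [show c + d + PySem.Int.floordiv (l * (l - 1)) 2
          = c + PySem.Int.floordiv (l * (l - 1)) 2 + d by ring]
      exact ih _ _ _
    · rw [show c + d + PySem.Int.floordiv (m * (m - 1)) 2
          = c + PySem.Int.floordiv (m * (m - 1)) 2 + d by ring]
      exact ih _ _ _
    · exact ih _ _ _

theorem fwd_alt (xs : List String) (c m l tM tL : Int)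
    (hM : tM = m + cntM xs) (hL : tL = l + cntL xs) :
    (xs.foldl (pvStepAlt tM tL) (c, m, l)).1 =
      (xs.foldl pvStepFwd (c, m, l)).1 + pvT xs 0 0 := by
  induction xs generalizing c m l with
  | nil => simp [pvT]
  | cons x rest ih =>
    simp only [cntM, cntL] at hM hL
    by_cases hxM : x == "M"
    · have hxL : (x == "L") = false := by
        simp only [beq_iff_eq] at hxM ⊢; simp [hxM]
      simp [hxM, hxL] at hM hL
      have hla : tL - l = cntL rest := by omega
      simp only [List.foldl_cons, pvStepAlt, pvStepFwd, pvT, hxM, hxL, if_true]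
      rw [hla, ih _ _ _ (by omega) (by omega), fwd_shift]
      simp
      ring
    · by_cases hxL : x == "L"
      · simp [hxM, hxL] at hM hL
        have hma : tM - m = cntM rest := by omega
        simp only [List.foldl_cons, pvStepAlt, pvStepFwd, pvT, hxM, hxL, Bool.false_eq_true,
          if_false, if_true]
        rw [hma, ih _ _ _ (by omega) (by omega), fwd_shift]
        simp
        ring
      · simp [hxM, hxL] at hM hL
        simp only [List.foldl_cons, pvStepAlt, pvStepFwd, pvT, hxM, hxL, Bool.false_eq_true,
          if_false]
        rw [ih _ _ _ (by omega) (by omega)]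
        simp

theorem count_eq_cntM (xs : List String) : ((PySem.List.count xs "M" : Int)) = cntM xs := by
  induction xs with
  | nil => simp [cntM, PySem.List.count]
  | cons x rest ih =>
    simp only [PySem.List.count, List.count_cons, cntM] at *
    by_cases h : x = "M" <;> simp [h] <;> omega

theorem count_eq_cntL (xs : List String) : ((PySem.List.count xs "L" : Int)) = cntL xs := by
  induction xs with
  | nil => simp [cntL, PySem.List.count]
  | cons x rest ih =>
    simp only [PySem.List.count, List.count_cons, cntL] at *
    by_cases h : x = "L" <;> simp [h] <;> omega

-- ===== VERDICT (by name: the statement is the Claim_ definition above) =====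
theorem count_valid_combinations_spec : Claim_equal_count_valid_combinations := by
  intro trees _
  unfold Spec_count_valid_combinations count_valid_combinations count_valid_combinations_alt
  simp only
  rw [count_eq_cntM, count_eq_cntL,
    fwd_alt trees 0 0 0 (cntM trees) (cntL trees) (by ring) (by ring),
    bwd_fold]
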